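-- pv_equiv track=rewrite | github.com/mir/maratai | opencode/skill/google-docs-sheets/scripts/cli.py | trim_columns
-- ===== SOURCE A (Python) =====
-- def trim_columns(rows: list[list[str]]) -> tuple[list[list[str]], int]:
--     """Trim empty trailing columns from rows."""
--     max_cols = 0
--     for row in rows:
--         last_non_empty = 0
--         for index, cell in enumerate(row):
--             if str(cell).strip() != "":
--                 last_non_empty = index + 1
--         if last_non_empty > max_cols:
--             max_cols = last_non_empty
--
--     if max_cols == 0:
--         return rows, 0
--
--     normalized = [row[:max_cols] + [""] * (max_cols - len(row)) for row in rows]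
--     return normalized, max_cols
-- ===== SOURCE B (Python) =====
-- def trim_columns(rows: list[list[str]]) -> tuple[list[list[str]], int]:
--     """Trim empty trailing columns from rows (column-major right-to-left scan)."""
--     width = max((len(r) for r in rows), default=0)
--     max_cols = 0
--     for c in range(width - 1, -1, -1):
--         if any(c < len(row) and str(row[c]).strip() != "" for row in rows):
--             max_cols = c + 1
--             break
--     if max_cols == 0:
--         return rows, 0
--     normalized = [row[:max_cols] + [""] * (max_cols - len(row)) for row in rows]
--     return normalized, max_cols
-- ===== Notes on version B (the rewrite author's own statement) =====
-- stated objective: alternative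
-- what changed: Replaces A's row-major pass that tracks each row's last non-blank index and folds a running maximum with a column-major scan from the rightmost column leftwards that stops at the first column containing any non-blank cell.
import Mathlib
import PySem

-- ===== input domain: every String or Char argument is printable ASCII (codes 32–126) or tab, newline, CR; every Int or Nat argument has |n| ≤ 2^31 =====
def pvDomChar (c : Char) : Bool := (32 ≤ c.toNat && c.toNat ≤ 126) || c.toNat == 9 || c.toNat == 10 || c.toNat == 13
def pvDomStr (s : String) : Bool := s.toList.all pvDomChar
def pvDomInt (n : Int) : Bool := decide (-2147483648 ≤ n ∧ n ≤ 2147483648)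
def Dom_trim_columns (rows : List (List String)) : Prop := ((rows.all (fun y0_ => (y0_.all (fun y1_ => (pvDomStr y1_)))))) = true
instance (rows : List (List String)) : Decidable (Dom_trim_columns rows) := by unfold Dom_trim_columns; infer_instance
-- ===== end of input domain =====

-- B replaces A's row-major pass (per-row last non-blank index folded into a running max)
-- with a column-major scan from the rightmost column leftwards that stops at the first
-- column containing a non-blank cell; alternative decomposition, same exact result.


-- ===== PORT A =====
-- literal port of A: the first loop (row-major, tracking last_non_empty per row and a
-- running max over rows), lifted into a named helper for the variable max_cols;
-- row[:max_cols] as PySem slice, [""]*(max_cols-len(row)) as PySem.List.pyRepeat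
def trim_columns_max_cols (rows : List (List String)) : Int :=
  rows.foldl (fun max_cols row =>
    let last_non_empty : Int := (PySem.List.enumerate row 0).foldl
      (fun last_non_empty p => if PySem.Str.strip p.2 ≠ "" then p.1 + 1 else last_non_empty) 0
    if last_non_empty > max_cols then last_non_empty else max_cols) 0

def trim_columns (rows : List (List String)) : List (List String) × Int :=
  if trim_columns_max_cols rows = 0 then (rows, 0)
  else (rows.map (fun row =>
          PySem.List.slice row none (some (trim_columns_max_cols rows)) ++
          PySem.List.pyRepeat [""] (trim_columns_max_cols rows - (row.length : Int))),
        trim_columns_max_cols rows)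

-- ===== PORT B =====
-- any(c < len(row) and str(row[c]).strip() != "" for row in rows)
def pvColHit (rows : List (List String)) (c : Nat) : Bool :=
  rows.any (fun row => decide (c < row.length) && decide (PySem.Str.strip (row.getD c "") ≠ ""))

-- the `for c in range(width-1, -1, -1): … break` loop: first hit from the right, else 0
def pvScanRight (p : Nat → Bool) : Nat → Nat
  | 0 => 0
  | k + 1 => if p k then k + 1 else pvScanRight p k

-- width = max((len(r) for r in rows), default=0)
def pvWidth (rows : List (List String)) : Nat :=
  rows.foldl (fun w r => max w r.length) 0

def pvMaxCols (rows : List (List String)) : Nat :=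
  pvScanRight (pvColHit rows) (pvWidth rows)

def trim_columns_alt (rows : List (List String)) : List (List String) × Int :=
  if pvMaxCols rows = 0 then (rows, 0)
  else (rows.map (fun row =>
          row.take (pvMaxCols rows) ++ List.replicate (pvMaxCols rows - row.length) ""),
        (pvMaxCols rows : Int))

-- ===== PRECONDITION & SPEC =====
def Spec_trim_columns (rows : List (List String)) (out : List (List String) × Int) : Prop := out = trim_columns_alt rows
instance (rows : List (List String)) (out : List (List String) × Int) : Decidable (Spec_trim_columns rows out) := by unfold Spec_trim_columns; infer_instance

-- ===== CLAIM (what is proved, stated in full; the proofs are below) =====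
def Claim_equal_trim_columns : Prop := ∀ (rows : List (List String)), Dom_trim_columns rows → Spec_trim_columns rows (trim_columns rows)

-- ===== LEMMAS AND PROOFS =====

-- predicate "row has a non-blank cell at column c" (false past the end: getD gives "")
def pvRowHit (row : List String) (c : Nat) : Bool :=
  decide (PySem.Str.strip (row.getD c "") ≠ "")

-- per-row last-non-blank as a right-to-left scan
def pvNScan (row : List String) : Nat := pvScanRight (pvRowHit row) row.length

theorem pvScanRight_le (p : Nat → Bool) (n : Nat) : pvScanRight p n ≤ n := by
  induction n with
  | zero => simp [pvScanRight]
  | succ k ih => simp only [pvScanRight]; split_ifs <;> omega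

theorem pvScanRight_congr (p q : Nat → Bool) (n : Nat)
    (h : ∀ c < n, p c = q c) : pvScanRight p n = pvScanRight q n := by
  induction n with
  | zero => rfl
  | succ k ih =>
      simp only [pvScanRight]
      rw [h k (by omega)]
      split_ifs with hq
      · rfl
      · exact ih (fun c hc => h c (by omega))

theorem pvScanRight_stable (p : Nat → Bool) (n m : Nat)
    (hb : ∀ c, p c = true → c < n) (hnm : n ≤ m) :
    pvScanRight p m = pvScanRight p n := by
  induction m with
  | zero => interval_cases n; rfl
  | succ k ih =>
      rcases Nat.lt_or_ge k n with h | h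
      · have : n = k + 1 := by omega
        simp [this]
      · have hpk : p k = false := by
          cases hpk : p k with
          | false => rfl
          | true => exact absurd (hb k hpk) (by omega)
        simp only [pvScanRight, hpk, Bool.false_eq_true, if_false]
        exact ih (by omega)

theorem pvScanRight_or (p q : Nat → Bool) (k : Nat) :
    pvScanRight (fun c => p c || q c) k = max (pvScanRight p k) (pvScanRight q k) := by
  induction k with
  | zero => rfl
  | succ n ih =>
      have hp := pvScanRight_le p n
      have hq := pvScanRight_le q n
      simp only [pvScanRight]
      by_cases hpn : p n = true <;> by_cases hqn : q n = true <;>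
        simp [hpn, hqn, ih] <;> omega

theorem pvScanRight_or_max (p q : Nat → Bool) (n m : Nat)
    (hp : ∀ c, p c = true → c < n) (hq : ∀ c, q c = true → c < m) :
    pvScanRight (fun c => p c || q c) (max n m) = max (pvScanRight p n) (pvScanRight q m) := by
  rw [pvScanRight_or,
      pvScanRight_stable p n (max n m) hp (Nat.le_max_left _ _),
      pvScanRight_stable q m (max n m) hq (Nat.le_max_right _ _)]

theorem pvRowHit_lt (row : List String) (c : Nat) (h : pvRowHit row c = true) :
    c < row.length := by
  by_contra hc
  have hnone : row[c]? = none := List.getElem?_eq_none (by omega)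
  simp [pvRowHit, List.getD, hnone] at h
  exact h (by decide)

-- the guarded test in pvColHit coincides with pvRowHit
theorem pvGuard_eq_rowHit (row : List String) (c : Nat) :
    (decide (c < row.length) && decide (PySem.Str.strip (row.getD c "") ≠ "")) = pvRowHit row c := by
  by_cases h : c < row.length
  · simp [pvRowHit, h]
  · have hnone : row[c]? = none := List.getElem?_eq_none (by omega)
    simp [pvRowHit, h, List.getD]
    decide

theorem pvColHit_cons (r : List String) (rest : List (List String)) (c : Nat) :
    pvColHit (r :: rest) c = (pvRowHit r c || pvColHit rest c) := by
  simp only [pvColHit, List.any_cons]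
  rw [pvGuard_eq_rowHit]

-- A's inner enumerate-fold equals the right-to-left scan of pvRowHit
theorem pvRowLast_eq (row : List String) :
    (PySem.List.enumerate row 0).foldl
      (fun last_non_empty p => if PySem.Str.strip p.2 ≠ "" then p.1 + 1 else last_non_empty) 0
    = ((pvNScan row : Nat) : Int) := by
  induction row using List.reverseRecOn with
  | nil => rfl
  | append_singleton xs x ih =>
      rw [PySem.List.enumerate_append, List.foldl_append]
      simp only [PySem.List.enumerate_cons, PySem.List.enumerate_nil, List.foldl_cons,
        List.foldl_nil]
      have hx : (xs ++ [x]).getD xs.length "" = x := by simp [List.getD]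
      have hph : pvRowHit (xs ++ [x]) xs.length = decide (PySem.Str.strip x ≠ "") := by
        simp [pvRowHit]
      have hcongr : pvScanRight (pvRowHit (xs ++ [x])) xs.length
          = pvScanRight (pvRowHit xs) xs.length := by
        refine pvScanRight_congr _ _ _ (fun c hc => ?_)
        simp [pvRowHit, List.getD, List.getElem?_append_left hc]
      have hlen : (xs ++ [x]).length = xs.length + 1 := by simp
      unfold pvNScan
      rw [hlen]
      simp only [pvScanRight, hph]
      by_cases hstr : PySem.Str.strip x ≠ ""
      · rw [if_pos hstr, if_pos (by simpa using hstr)]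
        push_cast; omega
      · rw [if_neg hstr, if_neg (by simpa using hstr), ih, hcongr]
        rfl

-- foldl-with-max as max of a foldr
theorem pvFoldlMax {α : Type} (f : α → Nat) (l : List α) (a : Nat) :
    l.foldl (fun m x => max m (f x)) a = max a (l.foldr (fun x acc => max (f x) acc) 0) := by
  induction l generalizing a with
  | nil => simp
  | cons x xs ih => simp [ih, Nat.max_assoc]

theorem pvWr_bound (rows : List (List String)) (row : List String) (h : row ∈ rows) :
    row.length ≤ rows.foldr (fun r acc => max r.length acc) 0 := by
  induction rows with
  | nil => cases h
  | cons r rest ih =>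
      rcases List.mem_cons.mp h with h | h
      · simp [h]
      · exact le_trans (ih h) (by simp)

theorem pvColHit_lt (rows : List (List String)) (c : Nat) (h : pvColHit rows c = true) :
    c < rows.foldr (fun r acc => max r.length acc) 0 := by
  rcases List.any_eq_true.mp h with ⟨row, hmem, hval⟩
  rw [pvGuard_eq_rowHit] at hval
  exact lt_of_lt_of_le (pvRowHit_lt _ _ hval) (pvWr_bound rows row hmem)

-- the heart: max over rows of per-row last-non-blank = right-to-left column scan
theorem pvMain (rows : List (List String)) :
    rows.foldr (fun r acc => max (pvNScan r) acc) 0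
    = pvScanRight (pvColHit rows) (rows.foldr (fun r acc => max r.length acc) 0) := by
  induction rows with
  | nil => rfl
  | cons r rest ih =>
      simp only [List.foldr_cons]
      rw [ih, pvScanRight_congr (pvColHit (r :: rest))
            (fun c => pvRowHit r c || pvColHit rest c) _
            (fun c _ => pvColHit_cons r rest c)]
      exact (pvScanRight_or_max _ _ _ _ (pvRowHit_lt r) (pvColHit_lt rest)).symm

-- A's Int max-fold is the cast of the Nat max-fold of pvNScan
theorem pvAFold (rows : List (List String)) (m : Nat) :
    rows.foldl (fun max_cols row =>
      let last_non_empty : Int := (PySem.List.enumerate row 0).foldl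
        (fun last_non_empty p => if PySem.Str.strip p.2 ≠ "" then p.1 + 1 else last_non_empty) 0
      if last_non_empty > max_cols then last_non_empty else max_cols) ((m : Nat) : Int)
    = ((rows.foldl (fun mc row => max mc (pvNScan row)) m : Nat) : Int) := by
  induction rows generalizing m with
  | nil => rfl
  | cons r rest ih =>
      simp only [List.foldl_cons]
      rw [pvRowLast_eq]
      have hstep : (if ((pvNScan r : Nat) : Int) > ((m : Nat) : Int) then ((pvNScan r : Nat) : Int)
          else ((m : Nat) : Int)) = ((max m (pvNScan r) : Nat) : Int) := by
        split_ifs <;> push_cast <;> omega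
      rw [hstep, ih]

theorem pvMaxCols_eq (rows : List (List String)) :
    trim_columns_max_cols rows = ((pvMaxCols rows : Nat) : Int) := by
  unfold trim_columns_max_cols pvMaxCols pvWidth
  have h0 := pvAFold rows 0
  rw [Nat.cast_zero] at h0
  rw [h0, pvFoldlMax pvNScan rows 0, Nat.zero_max, pvMain]
  congr 1
  rw [pvFoldlMax (fun r => r.length) rows 0, Nat.zero_max]

-- ===== VERDICT (by name: the statement is the Claim_ definition above) =====
theorem trim_columns_spec : Claim_equal_trim_columns := by
  intro rows _
  unfold Spec_trim_columns trim_columns trim_columns_alt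
  rw [pvMaxCols_eq]
  by_cases h0 : pvMaxCols rows = 0
  · simp [h0]
  · rw [if_neg (by exact_mod_cast h0), if_neg h0]
    congr 1
    refine List.map_congr_left (fun row _ => ?_)
    rw [PySem.List.slice_to_natCast, PySem.List.pyRepeat_singleton]
    congr 2
    omega
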